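-- pv_equiv track=rewrite | github.com/vinchinzu/euler | python/530.py | sum_floor_quotients
-- ===== SOURCE A (Python) =====
-- def sum_floor_quotients(n: int) -> int:
--     """Sum of floor quotients Σ_i ⌊n/i⌋."""
--     result = 0
--     i = 1
--     while i <= n:
--         q = n // i
--         j = n // q
--         result += q * (j - i + 1)
--         i = j + 1
--     return result
-- ===== SOURCE B (Python) =====
-- def sum_floor_quotients(n: int) -> int:
--     """Sum of floor quotients Σ_i ⌊n/i⌋."""
--     s = 0
--     i = 1
--     while i * i <= n:
--         s += n // i
--         i += 1
--     r = i - 1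
--     return 2 * s - r * r
-- ===== Notes on version B (the rewrite author's own statement) =====
-- stated objective: alternative
-- what changed: Replaces A's block-jumping loop (q = n//i, j = n//q, add q*(j-i+1), skip to j+1) with the hyperbola-symmetry method: sum n//i only for i up to isqrt(n) and return twice that partial sum minus the square of isqrt(n).
import Mathlib
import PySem

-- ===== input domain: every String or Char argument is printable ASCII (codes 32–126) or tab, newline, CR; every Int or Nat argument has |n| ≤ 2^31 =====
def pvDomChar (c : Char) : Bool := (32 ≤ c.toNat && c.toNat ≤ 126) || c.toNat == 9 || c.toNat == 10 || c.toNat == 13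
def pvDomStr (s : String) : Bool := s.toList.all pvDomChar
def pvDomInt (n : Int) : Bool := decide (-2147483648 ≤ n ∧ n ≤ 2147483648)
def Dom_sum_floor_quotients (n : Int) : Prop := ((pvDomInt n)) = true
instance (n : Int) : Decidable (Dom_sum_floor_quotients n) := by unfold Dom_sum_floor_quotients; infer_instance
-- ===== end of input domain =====

-- B replaces A's divisor-block jumping loop by the hyperbola-symmetry method
-- (sum n//i only up to isqrt(n), return 2*S - isqrt(n)^2); a different algorithm of the same cost.

-- ===== PORT A =====
-- A's while-loop: state (i, result); i starts at 1 and each iteration jumps to j+1 where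
-- j = n // (n // i).  The hypothesis 1 ≤ i is the loop invariant needed for termination.
def sfqLoop (n i result : Int) (hi : 1 ≤ i) : Int :=
  if h : i ≤ n then
    let q := PySem.Int.floordiv n i
    let j := PySem.Int.floordiv n q
    sfqLoop n (j + 1) (result + q * (j - i + 1))
      (by
        have hi0 : (0:Int) < i := by omega
        have hq1 : (1:Int) ≤ q := (PySem.Int.le_floordiv_iff_mul_le hi0).mpr (by omega)
        have hq0 : (0:Int) < q := by omega
        have hqi : q * i ≤ n := ((PySem.Int.floordiv_eq_iff_of_pos hi0).mp rfl).1
        have hij : i ≤ j := (PySem.Int.le_floordiv_iff_mul_le hq0).mpr (by nlinarith)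
        omega)
  else result
termination_by (n + 1 - i).toNat
decreasing_by
  have hi0 : (0:Int) < i := by omega
  have hq1 : (1:Int) ≤ PySem.Int.floordiv n i :=
    (PySem.Int.le_floordiv_iff_mul_le hi0).mpr (by omega)
  have hq0 : (0:Int) < PySem.Int.floordiv n i := by omega
  have hqi : PySem.Int.floordiv n i * i ≤ n :=
    ((PySem.Int.floordiv_eq_iff_of_pos hi0).mp rfl).1
  have hij : i ≤ PySem.Int.floordiv n (PySem.Int.floordiv n i) :=
    (PySem.Int.le_floordiv_iff_mul_le hq0).mpr (by nlinarith)
  omega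

def sum_floor_quotients (n : Int) : Int := sfqLoop n 1 0 (by omega)

-- ===== PORT B =====
-- B's while-loop: state (s, i); while i*i ≤ n add n//i to s and increment i.
-- Returns the pair (s, i) the loop ends with.  1 ≤ i is the invariant needed for termination.
def sfqAltLoop (n s i : Int) (hi : 1 ≤ i) : Int × Int :=
  if h : i * i ≤ n then
    sfqAltLoop n (s + PySem.Int.floordiv n i) (i + 1) (by omega)
  else (s, i)
termination_by (n + 1 - i).toNat
decreasing_by
  have : i ≤ n := by nlinarith
  omega

-- after the loop: r = i - 1 and the result is 2*s - r*r
def sfqAltFin (p : Int × Int) : Int := 2 * p.1 - (p.2 - 1) * (p.2 - 1)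

def sum_floor_quotients_alt (n : Int) : Int := sfqAltFin (sfqAltLoop n 0 1 (by omega))

-- ===== PRECONDITION & SPEC =====
def Spec_sum_floor_quotients (n : Int) (out : Int) : Prop := out = sum_floor_quotients_alt n
instance (n : Int) (out : Int) : Decidable (Spec_sum_floor_quotients n out) := by unfold Spec_sum_floor_quotients; infer_instance

-- ===== CLAIM (what is proved, stated in full; the proofs are below) =====
def Claim_equal_sum_floor_quotients : Prop := ∀ (n : Int), Dom_sum_floor_quotients n → Spec_sum_floor_quotients n (sum_floor_quotients n)

-- ===== LEMMAS AND PROOFS =====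

-- The tail sum Σ_{k=i}^{n} n//k, as a fold-free expression.
def sfqTail (n i : Int) : Int :=
  ((PySem.List.pyRange i (n + 1) 1).map (fun k => PySem.Int.floordiv n k)).sum

-- On the block i ≤ k ≤ j = n//(n//i), the quotient n//k is constant (= n//i).
theorem sfq_block_const (n i k : Int) (hi : 1 ≤ i) (hin : i ≤ n)
    (hik : i ≤ k) (hkj : k ≤ PySem.Int.floordiv n (PySem.Int.floordiv n i)) :
    PySem.Int.floordiv n k = PySem.Int.floordiv n i := by
  have hi0 : (0:Int) < i := by omega
  have hq1 : (1:Int) ≤ PySem.Int.floordiv n i :=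
    (PySem.Int.le_floordiv_iff_mul_le hi0).mpr (by omega)
  have hq0 : (0:Int) < PySem.Int.floordiv n i := by omega
  have hk0 : (0:Int) < k := by omega
  have hqi := (PySem.Int.floordiv_eq_iff_of_pos hi0).mp (rfl : PySem.Int.floordiv n i = _)
  have hjq : PySem.Int.floordiv n (PySem.Int.floordiv n i) * PySem.Int.floordiv n i ≤ n :=
    ((PySem.Int.floordiv_eq_iff_of_pos hq0).mp rfl).1
  refine (PySem.Int.floordiv_eq_iff_of_pos hk0).mpr ⟨by nlinarith [hqi.1], by nlinarith [hqi.2]⟩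

-- Loop invariant for A: from state (i, result) the loop returns result + Σ_{k=i}^{n} n//k.
theorem sfqLoop_eq_tail (n : Int) : ∀ (i result : Int) (hi : 1 ≤ i),
    sfqLoop n i result hi = result + sfqTail n i := by
  intro i result hi
  induction i, result, hi using sfqLoop.induct n with
  | case1 i result hi h q j ih =>
    have hqdef : q = PySem.Int.floordiv n i := rfl
    have hjdef : j = PySem.Int.floordiv n q := rfl
    have hi0 : (0:Int) < i := by omega
    have hq1 : (1:Int) ≤ q := (PySem.Int.le_floordiv_iff_mul_le hi0).mpr (by omega)
    have hq0 : (0:Int) < q := by omega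
    have hqi : q * i ≤ n := ((PySem.Int.floordiv_eq_iff_of_pos hi0).mp rfl).1
    have hij : i ≤ j := (PySem.Int.le_floordiv_iff_mul_le hq0).mpr (by nlinarith)
    have hjn : j ≤ n := by
      have hjq : j * q ≤ n := ((PySem.Int.floordiv_eq_iff_of_pos hq0).mp rfl).1
      nlinarith
    rw [sfqLoop, dif_pos h, ih]
    -- split the tail sum at j + 1
    have hsplit : PySem.List.pyRange i (n + 1) 1 =
        PySem.List.pyRange i (j + 1) 1 ++ PySem.List.pyRange (j + 1) (n + 1) 1 :=
      PySem.List.pyRange_one_append i (j + 1) (n + 1) (by omega) (by omega)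
    have hconst : (PySem.List.pyRange i (j + 1) 1).map (fun k => PySem.Int.floordiv n k) =
        (PySem.List.pyRange i (j + 1) 1).map (fun _ => q) := by
      refine List.map_congr_left ?_
      intro k hk
      have hk' := PySem.List.mem_pyRange_one.mp hk
      rw [hqdef] at hjdef
      exact sfq_block_const n i k hi h hk'.1 (by omega)
    have hblock :
        ((PySem.List.pyRange i (j + 1) 1).map (fun k => PySem.Int.floordiv n k)).sum =
          q * (j - i + 1) := by
      rw [hconst, PySem.List.sum_map_const_int, PySem.List.length_pyRange_one]
      have : ((j + 1 - i).toNat : Int) = j - i + 1 := by omega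
      rw [this]; ring
    unfold sfqTail
    rw [hsplit, List.map_append, List.sum_append, hblock]
    ring
  | case2 i result hi h =>
    rw [sfqLoop, dif_neg h]
    unfold sfqTail
    rw [PySem.List.pyRange_one_eq_nil (by omega)]
    simp

-- ===== the hyperbola identity, over ℕ =====

-- For i beyond the square root, the fiber {q ≤ √n : i*q ≤ n} is exactly Icc 1 (n/i).
theorem sfq_filter_q (n i : ℕ) (h1 : Nat.sqrt n + 1 ≤ i) (_h2 : i ≤ n) :
    ((Finset.Icc 1 (Nat.sqrt n)).filter (fun q => i * q ≤ n)).card = n / i := by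
  have hi0 : 0 < i := by omega
  have hni : n / i ≤ Nat.sqrt n := by
    have h3 : n / i ≤ n / (Nat.sqrt n + 1) := Nat.div_le_div_left h1 (by omega)
    have h4 : n / (Nat.sqrt n + 1) < Nat.sqrt n + 1 := by
      rw [Nat.div_lt_iff_lt_mul (by omega)]
      have := Nat.lt_succ_sqrt' n
      nlinarith
    omega
  have : (Finset.Icc 1 (Nat.sqrt n)).filter (fun q => i * q ≤ n) = Finset.Icc 1 (n / i) := by
    ext q
    simp only [Finset.mem_filter, Finset.mem_Icc]
    constructor
    · rintro ⟨⟨hq1, _⟩, hq3⟩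
      exact ⟨hq1, (Nat.le_div_iff_mul_le hi0).mpr (by nlinarith)⟩
    · rintro ⟨hq1, hq2⟩
      have := (Nat.le_div_iff_mul_le hi0).mp hq2
      exact ⟨⟨hq1, by omega⟩, by nlinarith⟩
  rw [this, Nat.card_Icc]
  simp

-- For q up to the square root, the fiber {√n < i ≤ n : i*q ≤ n} is exactly Icc (√n+1) (n/q).
theorem sfq_filter_i (n q : ℕ) (h1 : 1 ≤ q) (h2 : q ≤ Nat.sqrt n) :
    ((Finset.Icc (Nat.sqrt n + 1) n).filter (fun i => i * q ≤ n)).card = n / q - Nat.sqrt n := by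
  have hq0 : 0 < q := h1
  have hrr : Nat.sqrt n * Nat.sqrt n ≤ n := by
    have := Nat.sqrt_le' n; nlinarith
  have hnq : Nat.sqrt n ≤ n / q := by
    rw [Nat.le_div_iff_mul_le hq0]; nlinarith
  have hqn : n / q ≤ n := Nat.div_le_self n q
  have : (Finset.Icc (Nat.sqrt n + 1) n).filter (fun i => i * q ≤ n) =
      Finset.Icc (Nat.sqrt n + 1) (n / q) := by
    ext i
    simp only [Finset.mem_filter, Finset.mem_Icc]
    constructor
    · rintro ⟨⟨hi1, _⟩, hi3⟩
      exact ⟨hi1, (Nat.le_div_iff_mul_le hq0).mpr hi3⟩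
    · rintro ⟨hi1, hi2⟩
      have := (Nat.le_div_iff_mul_le hq0).mp hi2
      exact ⟨⟨hi1, by omega⟩, this⟩
  rw [this, Nat.card_Icc]
  omega

-- Double counting {(i,q) : √n < i ≤ n, 1 ≤ q ≤ √n, i*q ≤ n} by each coordinate.
theorem sfq_swap (n : ℕ) :
    ∑ i ∈ Finset.Icc (Nat.sqrt n + 1) n, n / i =
      ∑ q ∈ Finset.Icc 1 (Nat.sqrt n), (n / q - Nat.sqrt n) := by
  calc ∑ i ∈ Finset.Icc (Nat.sqrt n + 1) n, n / i
      = ∑ i ∈ Finset.Icc (Nat.sqrt n + 1) n,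
          ((Finset.Icc 1 (Nat.sqrt n)).filter (fun q => i * q ≤ n)).card := by
        refine Finset.sum_congr rfl ?_
        intro i hi
        have hi' := Finset.mem_Icc.mp hi
        exact (sfq_filter_q n i hi'.1 hi'.2).symm
    _ = ∑ i ∈ Finset.Icc (Nat.sqrt n + 1) n, ∑ q ∈ Finset.Icc 1 (Nat.sqrt n),
          (if i * q ≤ n then 1 else 0) := by
        refine Finset.sum_congr rfl ?_
        intro i _
        exact Finset.card_filter _ _
    _ = ∑ q ∈ Finset.Icc 1 (Nat.sqrt n), ∑ i ∈ Finset.Icc (Nat.sqrt n + 1) n,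
          (if i * q ≤ n then 1 else 0) := Finset.sum_comm
    _ = ∑ q ∈ Finset.Icc 1 (Nat.sqrt n),
          ((Finset.Icc (Nat.sqrt n + 1) n).filter (fun i => i * q ≤ n)).card := by
        refine Finset.sum_congr rfl ?_
        intro q _
        exact (Finset.card_filter _ _).symm
    _ = ∑ q ∈ Finset.Icc 1 (Nat.sqrt n), (n / q - Nat.sqrt n) := by
        refine Finset.sum_congr rfl ?_
        intro q hq
        have hq' := Finset.mem_Icc.mp hq
        exact sfq_filter_i n q hq'.1 hq'.2

-- Hyperbola identity: Σ_{i=1}^{n} n/i + (√n)² = 2 · Σ_{i=1}^{√n} n/i.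
theorem sfq_hyperbola (n : ℕ) :
    (∑ i ∈ Finset.Icc 1 n, n / i) + Nat.sqrt n * Nat.sqrt n =
      2 * ∑ i ∈ Finset.Icc 1 (Nat.sqrt n), n / i := by
  have hIcc : ∀ a b : ℕ, Finset.Ioc a b = Finset.Icc (a + 1) b := by
    intro a b; ext x; simp only [Finset.mem_Ioc, Finset.mem_Icc]; omega
  have hrn : Nat.sqrt n ≤ n := Nat.sqrt_le_self n
  have hrr : Nat.sqrt n * Nat.sqrt n ≤ n := by
    have := Nat.sqrt_le' n; nlinarith
  -- split Σ_{1..n} at √n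
  have hsplit : (∑ i ∈ Finset.Icc 1 (Nat.sqrt n), n / i) +
      (∑ i ∈ Finset.Icc (Nat.sqrt n + 1) n, n / i) = ∑ i ∈ Finset.Icc 1 n, n / i := by
    have h0 := Finset.sum_Ioc_consecutive (fun i => n / i)
      (Nat.zero_le (Nat.sqrt n)) hrn
    rw [hIcc, hIcc, hIcc] at h0
    simpa using h0
  -- the far part, re-counted by quotient, plus (√n)² gives the near part again
  have hfar : (∑ i ∈ Finset.Icc (Nat.sqrt n + 1) n, n / i) + Nat.sqrt n * Nat.sqrt n =
      ∑ q ∈ Finset.Icc 1 (Nat.sqrt n), n / q := by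
    rw [sfq_swap n]
    have hconst : ∑ _q ∈ Finset.Icc 1 (Nat.sqrt n), Nat.sqrt n =
        Nat.sqrt n * Nat.sqrt n := by
      rw [Finset.sum_const, Nat.card_Icc, smul_eq_mul]
      simp
    rw [← hconst, ← Finset.sum_add_distrib]
    refine Finset.sum_congr rfl ?_
    intro q hq
    have hq' := Finset.mem_Icc.mp hq
    have : Nat.sqrt n ≤ n / q := by
      rw [Nat.le_div_iff_mul_le hq'.1]; nlinarith [hq'.2]
    omega
  rw [← hsplit, add_assoc, hfar]
  omega

-- ===== bridges between the ports (over ℤ) and the ℕ sums =====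

theorem sfq_list_range_sum (f : ℕ → ℕ) (m : ℕ) :
    ((List.range m).map f).sum = ∑ i ∈ Finset.range m, f i := by
  induction m with
  | zero => simp
  | succ k ih => simp [List.range_succ, Finset.sum_range_succ, ih]

theorem sfq_icc_range_sum (f : ℕ → ℕ) (m : ℕ) :
    ∑ i ∈ Finset.Icc 1 m, f i = ∑ k ∈ Finset.range m, f (1 + k) := by
  induction m with
  | zero => simp
  | succ k ih =>
    rw [Finset.sum_Icc_succ_top (by omega), Finset.sum_range_succ, ih]
    norm_num [Nat.add_comm]

-- A's total is the ℕ sum Σ_{i=1}^{n} n/i, cast to ℤ.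
theorem sfqTail_eq_nat (n : Int) (hn : 0 ≤ n) :
    sfqTail n 1 = ((∑ i ∈ Finset.Icc 1 n.toNat, n.toNat / i : ℕ) : Int) := by
  unfold sfqTail
  rw [PySem.List.pyRange_one]
  have harg : (n + 1 - 1).toNat = n.toNat := by omega
  rw [harg, List.map_map]
  have hmap : (List.range n.toNat).map
      ((fun k => PySem.Int.floordiv n k) ∘ fun k : ℕ => (1 : Int) + ↑k) =
      (List.range n.toNat).map (fun k : ℕ => ((n.toNat / (1 + k) : ℕ) : Int)) := by
    refine List.map_congr_left ?_
    intro k _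
    show PySem.Int.floordiv n (1 + (k : Int)) = ((n.toNat / (1 + k) : ℕ) : Int)
    conv_lhs => rw [← Int.toNat_of_nonneg hn]
    rw [show ((1 : Int) + (k : Int)) = ((1 + k : ℕ) : Int) by push_cast; ring]
    exact PySem.Int.floordiv_natCast _ _
  rw [hmap, show (List.range n.toNat).map (fun k : ℕ => ((n.toNat / (1 + k) : ℕ) : Int)) =
      ((List.range n.toNat).map (fun k : ℕ => n.toNat / (1 + k))).map
        (fun j : ℕ => (j : Int)) by rw [List.map_map]; rfl]
  rw [← Nat.cast_list_sum]
  congr 1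
  rw [sfq_list_range_sum, ← sfq_icc_range_sum]

-- B's loop, from state (s, i) with i ≤ √n + 1, returns (s + Σ_{k=i}^{√n} n/k, √n + 1).
theorem sfqAltLoop_spec (n : Int) (hn : 0 ≤ n) (s i : Int) (hi : 1 ≤ i)
    (hle : i ≤ ((Nat.sqrt n.toNat : ℕ) : Int) + 1) :
    sfqAltLoop n s i hi =
      (s + ((∑ k ∈ Finset.Icc i.toNat (Nat.sqrt n.toNat), n.toNat / k : ℕ) : Int),
        ((Nat.sqrt n.toNat : ℕ) : Int) + 1) := by
  revert hle
  induction s, i, hi using sfqAltLoop.induct n with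
  | case1 s i hi h ih =>
    intro hle
    have hit : (i.toNat : Int) = i := Int.toNat_of_nonneg (by omega)
    have hsq : i.toNat ≤ Nat.sqrt n.toNat := by
      have h2 : i.toNat * i.toNat ≤ n.toNat := by
        zify; rw [hit, Int.toNat_of_nonneg hn]; exact h
      have := Nat.le_sqrt'.mpr (by nlinarith [h2] : i.toNat ^ 2 ≤ n.toNat)
      exact this
    have hle2 : i + 1 ≤ ((Nat.sqrt n.toNat : ℕ) : Int) + 1 := by omega
    rw [sfqAltLoop, dif_pos h, ih hle2]
    have hdiv : PySem.Int.floordiv n i = ((n.toNat / i.toNat : ℕ) : Int) := by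
      conv_lhs => rw [← Int.toNat_of_nonneg hn, ← hit]
      exact PySem.Int.floordiv_natCast _ _
    have hsum : (∑ k ∈ Finset.Icc i.toNat (Nat.sqrt n.toNat), n.toNat / k : ℕ) =
        n.toNat / i.toNat + ∑ k ∈ Finset.Icc ((i + 1).toNat) (Nat.sqrt n.toNat), n.toNat / k := by
      have h1 : (i + 1).toNat = i.toNat + 1 := by omega
      have h2 : Finset.Icc i.toNat (Nat.sqrt n.toNat) =
          Finset.cons i.toNat (Finset.Ioc i.toNat (Nat.sqrt n.toNat)) (by simp) :=
        Finset.Icc_eq_cons_Ioc hsq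
      have h3 : Finset.Ioc i.toNat (Nat.sqrt n.toNat) =
          Finset.Icc (i.toNat + 1) (Nat.sqrt n.toNat) := by
        ext x; simp only [Finset.mem_Ioc, Finset.mem_Icc]; omega
      rw [h2, Finset.sum_cons, h3, h1]
    rw [hdiv, hsum]
    push_cast
    simp only [Prod.mk.injEq]
    refine ⟨by ring, ?_⟩
    trivial
  | case2 s i hi h =>
    intro hle
    have hit : (i.toNat : Int) = i := Int.toNat_of_nonneg (by omega)
    have hgt : ((Nat.sqrt n.toNat : ℕ) : Int) < i := by
      by_contra hcon
      have hcon : i ≤ ((Nat.sqrt n.toNat : ℕ) : Int) := by omega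
      have hrr : (Nat.sqrt n.toNat * Nat.sqrt n.toNat : ℕ) ≤ n.toNat := by
        have := Nat.sqrt_le' n.toNat; nlinarith
      have : i * i ≤ n := by
        have h1 : (0:Int) ≤ ((Nat.sqrt n.toNat : ℕ) : Int) := by positivity
        have h2 : ((Nat.sqrt n.toNat * Nat.sqrt n.toNat : ℕ) : Int) ≤ n := by
          rw [← Int.toNat_of_nonneg hn]; exact_mod_cast hrr
        push_cast at h2
        nlinarith
      exact h this
    have hieq : i = ((Nat.sqrt n.toNat : ℕ) : Int) + 1 := by omega
    have hempty : Finset.Icc i.toNat (Nat.sqrt n.toNat) = ∅ := by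
      apply Finset.Icc_eq_empty
      omega
    rw [sfqAltLoop, dif_neg h, hempty]
    simp [hieq]

-- ===== VERDICT (by name: the statement is the Claim_ definition above) =====
theorem sum_floor_quotients_spec : Claim_equal_sum_floor_quotients := by
  intro n _
  show sum_floor_quotients n = sum_floor_quotients_alt n
  unfold sum_floor_quotients sum_floor_quotients_alt sfqAltFin
  by_cases hn : 0 ≤ n
  · rw [sfqLoop_eq_tail, sfqTail_eq_nat n hn,
      sfqAltLoop_spec n hn 0 1 (by omega) (by omega)]
    have hmain := sfq_hyperbola n.toNat
    have hcast := congrArg (fun x : ℕ => (x : Int)) hmain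
    push_cast at hcast
    simp only [Int.toNat_one]
    push_cast
    nlinarith [hcast]
  · rw [sfqLoop, dif_neg (by omega)]
    rw [sfqAltLoop, dif_neg (by omega : ¬ (1 : Int) * 1 ≤ n)]
    norm_num
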